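-- pv_equiv track=rewrite | github.com/Gherghel-Vlad/University | Year 1/Semester 1/FP projects/a2-Vlad-Zeno/src/program.py | starting_from_the_second
-- ===== SOURCE A (Python) =====
-- def create_complex_number(real, imag):
--     """
--     Creates a complex number
--     :param real: The real part of the number
--     :param imag: The imaginary part of the function
--     :return: A complex number formed with the given params
--     """
--     return {"real": real, "imag": imag}
--
-- def get_real_part(complex_number):
--     """
--     Returns the real part of the complex number
--     :param complex_number: The complex number
--     :return: The real part of the complex number
--     """
--     return complex_number["real"]
--
-- def get_imag_part(complex_number):
--     """
--     Returns the imaginary part of the complex number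
--     :param complex_number: The complex number
--     :return: The imaginary part of the complex number
--     """
--     return complex_number["imag"]
--
-- def add_real_parts(complex_number_1, complex_number_2):
--     """
--     Adds the real part of 2 complex numbers and returns it
--     :param complex_number_1: First complex number
--     :param complex_number_2: Second complex number
--     :return: A number that represents the sum of the real parts of the complex numbers
--     """
--     return get_real_part(complex_number_1) + get_real_part(complex_number_2)
--
-- def add_imaginary_parts(complex_number_1, complex_number_2):
--     """
--     Adds the imaginary part of 2 complex numbers and returns it
--     :param complex_number_1: First complex number
--     :param complex_number_2: Second complex number
--     :return: A number that represents the sum of the imaginary parts of the complex numbers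
--     """
--     return get_imag_part(complex_number_1) + get_imag_part(complex_number_2)
--
-- def add_2_complex_numbers(complex_number_1, complex_number_2):
--     """
--     Adds 2 complex numbers
--     :param complex_number_1: First one
--     :param complex_number_2: Second one
--     :return: A complex number that is the sum of the other 2
--     """
--     return create_complex_number(add_real_parts(complex_number_1, complex_number_2), add_imaginary_parts(complex_number_1, complex_number_2))
--
-- def compare_2_complex_numbers(complex_number_1, complex_number_2):
--     """
--     Compares 2 complex numbers
--     :param complex_number_1:
--     :param complex_number_2:
--     :return: True if they are equal, False if not
--     """
--     if get_real_part(complex_number_1) == get_real_part(complex_number_2) and get_imag_part(complex_number_1) == get_imag_part(complex_number_2):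
--         return True
--     return False
--
-- def starting_from_the_second(complex_number_list):
--     """
--     Solves the case in which we make pairs from the second element
--     :param complex_number_list: -
--     :return: A list that contains the maximum elements of the sequence asked for
--     """
--     # we create 2 empty lists
--     current_list = []
--     answer_list = []
--
--     # we start from the first pair
--     current_list.append(complex_number_list[1])
--     current_list.append(complex_number_list[2])
--
--     for index in range(3, len(complex_number_list), 2):
--         # we check that there are 2 elements remaining so that we can create the next pair
--         if len(complex_number_list) - 1 - index >= 1:
--             # we see if the next pair has the same sum as the last pair
--             if compare_2_complex_numbers(add_2_complex_numbers(current_list[-1], current_list[-2]),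
--                                          add_2_complex_numbers(complex_number_list[index],
--                                                                complex_number_list[index + 1])):
--                 current_list.append(complex_number_list[index])
--                 current_list.append(complex_number_list[index + 1])
--             else:
--                 # if not we see if the result is what we need and
--                 # create another list that starts from the pair that has the different sum
--                 if len(answer_list) < len(current_list):
--                     answer_list = current_list
--                 current_list = [complex_number_list[index], complex_number_list[index + 1]]
--
--     # we check one last time (because the else part might not be reached if the last pair is correct
--     if len(answer_list) < len(current_list):
--         answer_list = current_list
--
--     return answer_list
-- ===== SOURCE B (Python) =====
-- def starting_from_the_second(complex_number_list):
--     """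
--     Table-driven rewrite: build the list of considered pairs and their sums,
--     locate the earliest longest run of consecutive equal sums by index,
--     then slice and flatten that run.
--     """
--     # the first pair is taken unconditionally (IndexError for short lists, as in A)
--     pairs = [(complex_number_list[1], complex_number_list[2])]
--     i = 3
--     while i + 2 <= len(complex_number_list):
--         pairs.append((complex_number_list[i], complex_number_list[i + 1]))
--         i += 2
--
--     if len(pairs) == 1:
--         # a single pair is trivially the longest run; no sums needed
--         return [pairs[0][0], pairs[0][1]]
--
--     def pair_sum(p):
--         a, b = p
--         return (a["real"] + b["real"], a["imag"] + b["imag"])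
--
--     sums = [pair_sum(p) for p in pairs]
--
--     best_start = 0
--     best_len = 0
--     start = 0
--     for k in range(1, len(sums) + 1):
--         if k == len(sums) or sums[k] != sums[k - 1]:
--             if k - start > best_len:
--                 best_start = start
--                 best_len = k - start
--             start = k
--
--     out = []
--     for p in pairs[best_start:best_start + best_len]:
--         out.extend(p)
--     return out
-- ===== Notes on version B (the rewrite author's own statement) =====
-- stated objective: alternative
-- what changed: A grows and swaps candidate element lists while scanning; B first materialises the table of considered pairs and their sums, finds the earliest longest run of equal consecutive sums as a pair of indices, and flattens that slice at the end.
import Mathlib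
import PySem

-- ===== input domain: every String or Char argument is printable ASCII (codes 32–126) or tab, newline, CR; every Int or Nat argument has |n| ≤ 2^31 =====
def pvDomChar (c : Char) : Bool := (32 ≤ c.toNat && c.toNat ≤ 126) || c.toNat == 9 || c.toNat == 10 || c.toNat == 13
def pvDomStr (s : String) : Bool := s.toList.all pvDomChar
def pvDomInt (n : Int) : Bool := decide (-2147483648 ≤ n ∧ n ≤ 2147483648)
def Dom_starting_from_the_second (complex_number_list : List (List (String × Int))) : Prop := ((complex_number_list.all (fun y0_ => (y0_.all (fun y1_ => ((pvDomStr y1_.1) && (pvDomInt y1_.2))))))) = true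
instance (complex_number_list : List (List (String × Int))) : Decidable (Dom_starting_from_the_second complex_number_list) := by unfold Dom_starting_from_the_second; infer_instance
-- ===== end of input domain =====

-- B replaces A's growing/swap of candidate element lists by a pairs-and-sums table,
-- an index scan for the earliest longest run of equal consecutive sums, and one final
-- slice-and-flatten; objective: alternative decomposition (same asymptotic cost).

-- ===== PORT A =====
-- d["real"] / d["imag"]: exact via PySem.Dict when the key is present (ensured by
-- Pre_ for every element the program reads); KeyError (excluded by Pre_) otherwise.
def pvReal (d : List (String × Int)) : Int := PySem.Dict.getD (PySem.Dict.ofList d) "real" 0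
def pvImag (d : List (String × Int)) : Int := PySem.Dict.getD (PySem.Dict.ofList d) "imag" 0

-- add_2_complex_numbers (with create_complex_number inlined as the dict literal)
def pvAdd2 (x y : List (String × Int)) : List (String × Int) :=
  [("real", pvReal x + pvReal y), ("imag", pvImag x + pvImag y)]

-- compare_2_complex_numbers
def pvCompare2 (x y : List (String × Int)) : Bool :=
  if pvReal x == pvReal y && pvImag x == pvImag y then true else false

-- one body of A's for-loop; state = (current_list, answer_list)
def pvStepA (l : List (List (String × Int)))
    (s : List (List (String × Int)) × List (List (String × Int))) (index : Int) :
    List (List (String × Int)) × List (List (String × Int)) :=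
  if (1 : Int) ≤ (l.length : Int) - 1 - index then
    if pvCompare2 (pvAdd2 (PySem.List.pyGetD s.1 (-1) []) (PySem.List.pyGetD s.1 (-2) []))
                  (pvAdd2 (PySem.List.pyGetD l index []) (PySem.List.pyGetD l (index + 1) [])) then
      (s.1 ++ [PySem.List.pyGetD l index [], PySem.List.pyGetD l (index + 1) []], s.2)
    else
      if s.2.length < s.1.length then
        ([PySem.List.pyGetD l index [], PySem.List.pyGetD l (index + 1) []], s.1)
      else
        ([PySem.List.pyGetD l index [], PySem.List.pyGetD l (index + 1) []], s.2)
  else s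

def starting_from_the_second (complex_number_list : List (List (String × Int))) :
    List (List (String × Int)) :=
  match PySem.List.pyGet? complex_number_list 1, PySem.List.pyGet? complex_number_list 2 with
  | some e1, some e2 =>
    let st := (PySem.List.pyRange 3 (complex_number_list.length : Int) 2).foldl
      (pvStepA complex_number_list) ([e1, e2], [])
    if st.2.length < st.1.length then st.1 else st.2
  | _, _ => []  -- IndexError (len < 3): excluded by Pre_

-- ===== PORT B =====
-- B's own port of d["real"] / d["imag"] (exact when the key is present, as Pre_ ensures)
def pvRealB (d : List (String × Int)) : Int := PySem.Dict.getD (PySem.Dict.ofList d) "real" 0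
def pvImagB (d : List (String × Int)) : Int := PySem.Dict.getD (PySem.Dict.ofList d) "imag" 0

-- the while loop building the pair table from index 3
def pvBuildPairs (l : List (List (String × Int))) (i : Nat) :
    List ((List (String × Int)) × (List (String × Int))) :=
  if h : i + 2 ≤ l.length then
    (PySem.List.pyGetD l (i : Int) [], PySem.List.pyGetD l ((i : Int) + 1) []) ::
      pvBuildPairs l (i + 2)
  else []
termination_by l.length - i
decreasing_by omega

-- pair_sum
def pvPairSum (p : (List (String × Int)) × (List (String × Int))) : Int × Int :=
  (pvRealB p.1 + pvRealB p.2, pvImagB p.1 + pvImagB p.2)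

-- one body of B's scan loop; state = (best_start, best_len, start)
def pvStepB (sums : List (Int × Int)) (s : Int × Int × Int) (k : Int) : Int × Int × Int :=
  if k == (sums.length : Int) ||
     !(PySem.List.pyGetD sums k (0, 0) == PySem.List.pyGetD sums (k - 1) (0, 0)) then
    if k - s.2.2 > s.2.1 then (s.2.2, k - s.2.2, k) else (s.1, s.2.1, k)
  else s

def starting_from_the_second_alt (complex_number_list : List (List (String × Int))) :
    List (List (String × Int)) :=
  match PySem.List.pyGet? complex_number_list 1 with
  | none => []  -- IndexError (len < 2): excluded by Pre_
  | some e1 =>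
    match PySem.List.pyGet? complex_number_list 2 with
    | none => []  -- IndexError (len < 3): excluded by Pre_
    | some e2 =>
      let pairs := (e1, e2) :: pvBuildPairs complex_number_list 3
      if pairs.length == 1 then
        [(PySem.List.pyGetD pairs 0 ([], [])).1, (PySem.List.pyGetD pairs 0 ([], [])).2]
      else
      let sums := pairs.map pvPairSum
      let r := (PySem.List.pyRange 1 ((sums.length : Int) + 1) 1).foldl (pvStepB sums) (0, 0, 0)
      (PySem.List.slice pairs (some r.1) (some (r.1 + r.2.1))).foldl
        (fun acc p => acc ++ [p.1, p.2]) []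

-- ===== PRECONDITION & SPEC =====
-- Pre_ = exactly the inputs where Python A returns: at least 3 elements (else IndexError
-- on list[1]/list[2]); and, when there are at least two full pairs (length > 4, so the
-- loop actually compares sums), every element the program reads (indices 1..2*((len-1)/2),
-- i.e. all full pairs) has both keys "real" and "imag" (else KeyError).
def Pre_starting_from_the_second (complex_number_list : List (List (String × Int))) : Prop :=
  3 ≤ complex_number_list.length ∧
  (4 < complex_number_list.length →
    ∀ d ∈ (complex_number_list.drop 1).take (2 * ((complex_number_list.length - 1) / 2)),
      (PySem.Dict.contains (PySem.Dict.ofList d) "real"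
        && PySem.Dict.contains (PySem.Dict.ofList d) "imag") = true)
instance (complex_number_list : List (List (String × Int))) : Decidable (Pre_starting_from_the_second complex_number_list) := by unfold Pre_starting_from_the_second; infer_instance

def pvWitness_starting_from_the_second : (List (List (String × Int))) :=
  [[("real", 1), ("imag", 2)], [("real", 3), ("imag", 4)], [("real", 5), ("imag", 6)]]

def Spec_starting_from_the_second (complex_number_list : List (List (String × Int))) (out : List (List (String × Int))) : Prop := out = starting_from_the_second_alt complex_number_list
instance (complex_number_list : List (List (String × Int))) (out : List (List (String × Int))) : Decidable (Spec_starting_from_the_second complex_number_list out) := by unfold Spec_starting_from_the_second; infer_instance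

-- ===== CLAIM (what is proved, stated in full; the proofs are below) =====
def Claim_equal_starting_from_the_second : Prop := ∀ (complex_number_list : List (List (String × Int))), Dom_starting_from_the_second complex_number_list → Pre_starting_from_the_second complex_number_list → Spec_starting_from_the_second complex_number_list (starting_from_the_second complex_number_list)

-- ===== LEMMAS AND PROOFS =====

-- proof-side default pair
def pvPd : (List (String × Int)) × (List (String × Int)) := ([], [])

-- loop body of A's fold seen on the pair table (guard and index access resolved)
def pvStepP (s : List (List (String × Int)) × List (List (String × Int)))
    (p : (List (String × Int)) × (List (String × Int))) :
    List (List (String × Int)) × List (List (String × Int)) :=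
  if pvCompare2 (pvAdd2 (PySem.List.pyGetD s.1 (-1) []) (PySem.List.pyGetD s.1 (-2) []))
                (pvAdd2 p.1 p.2) then
    (s.1 ++ [p.1, p.2], s.2)
  else
    if s.2.length < s.1.length then ([p.1, p.2], s.1) else ([p.1, p.2], s.2)

def pvFlat (ps : List ((List (String × Int)) × (List (String × Int)))) :
    List (List (String × Int)) :=
  ps.flatMap (fun p => [p.1, p.2])

def pvSegN (ps : List ((List (String × Int)) × (List (String × Int)))) (a b : Nat) :
    List ((List (String × Int)) × (List (String × Int))) :=
  (ps.drop a).take (b - a)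

def pvFinal (s : List (List (String × Int)) × List (List (String × Int))) :
    List (List (String × Int)) :=
  if s.2.length < s.1.length then s.1 else s.2

lemma pvPyRange_two_cons (a b : Int) (h : a < b) :
    PySem.List.pyRange a b 2 = a :: PySem.List.pyRange (a + 2) b 2 := by
  rw [PySem.List.pyRange_of_pos a b (by norm_num), PySem.List.pyRange_of_pos (a+2) b (by norm_num)]
  have e1 : b - a + 2 - 1 = b - a + 1 := by ring
  have e2 : b - (a + 2) + 2 - 1 = b - a - 1 := by ring
  rw [e1, e2, if_pos h]
  have hc : ((b - a + 1) / 2).toNat = (if a + 2 < b then ((b - a - 1) / 2).toNat else 0) + 1 := by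
    split_ifs with h2 <;> omega
  rw [hc]
  split_ifs with h2
  · rw [List.range_succ_eq_map, List.map_cons, List.map_map]
    congr 1
    · ring
    · apply List.map_congr_left
      intro k _
      simp only [Function.comp]
      push_cast
      ring
  · rw [List.range_succ_eq_map, List.map_cons, List.map_map]
    simp

lemma pvStepA_eq (l : List (List (String × Int)))
    (s : List (List (String × Int)) × List (List (String × Int))) (i : Nat)
    (h : i + 2 ≤ l.length) :
    pvStepA l s (i : Int) =
      pvStepP s (PySem.List.pyGetD l (i : Int) [], PySem.List.pyGetD l ((i : Int) + 1) []) := by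
  rw [pvStepA, if_pos (by push_cast; omega)]
  simp [pvStepP]

lemma pvFoldA_eq_foldP (l : List (List (String × Int))) (i : Nat) :
    ∀ s, (PySem.List.pyRange (i : Int) (l.length : Int) 2).foldl (pvStepA l) s =
      (pvBuildPairs l i).foldl pvStepP s := by
  intro s
  by_cases h1 : l.length ≤ i
  · rw [PySem.List.pyRange_of_pos _ _ (by norm_num), if_neg (by push_cast; omega)]
    rw [pvBuildPairs, dif_neg (by omega)]
    simp
  · have h1' : i < l.length := Nat.lt_of_not_le h1
    rw [pvPyRange_two_cons (i : Int) (l.length : Int) (by exact_mod_cast h1'), List.foldl_cons]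
    by_cases h2 : i + 2 ≤ l.length
    · rw [pvBuildPairs, dif_pos h2, List.foldl_cons, pvStepA_eq l s i h2]
      have hcast : ((i : Int) + 2) = ((i + 2 : Nat) : Int) := by push_cast; ring
      rw [hcast]
      exact pvFoldA_eq_foldP l (i + 2) _
    · rw [pvBuildPairs, dif_neg h2]
      have hstep : pvStepA l s (i : Int) = s := by
        rw [pvStepA, if_neg (by push_cast; omega)]
      rw [hstep]
      rw [PySem.List.pyRange_of_pos _ _ (by norm_num), if_neg (by push_cast; omega)]
      simp
termination_by l.length - i
decreasing_by omega

lemma pvGet_neg1 {α : Type} (ys : List α) (a b d : α) :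
    PySem.List.pyGetD (ys ++ [a, b]) (-1) d = b := by
  simp [PySem.List.pyGetD, PySem.List.pyGet?, PySem.List.pyIdx?]

lemma pvGet_neg2 {α : Type} (ys : List α) (a b d : α) :
    PySem.List.pyGetD (ys ++ [a, b]) (-2) d = a := by
  simp [PySem.List.pyGetD, PySem.List.pyGet?, PySem.List.pyIdx?]

lemma pvFlat_append (u v : List ((List (String × Int)) × (List (String × Int)))) :
    pvFlat (u ++ v) = pvFlat u ++ pvFlat v := by
  simp [pvFlat]

lemma pvFlat_single (p : (List (String × Int)) × (List (String × Int))) :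
    pvFlat [p] = [p.1, p.2] := by
  simp [pvFlat]

lemma pvFlat_length (ps : List ((List (String × Int)) × (List (String × Int)))) :
    (pvFlat ps).length = 2 * ps.length := by
  induction ps with
  | nil => simp [pvFlat]
  | cons p t ih => simp [pvFlat] at ih ⊢; omega

lemma pvSeg_length (ps : List ((List (String × Int)) × (List (String × Int)))) (a b : Nat)
    (h : b ≤ ps.length) : (pvSegN ps a b).length = b - a := by
  simp [pvSegN]; omega

lemma pvSeg_snoc (ps : List ((List (String × Int)) × (List (String × Int)))) (a b : Nat)
    (h1 : a ≤ b) (h2 : b < ps.length) :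
    pvSegN ps a (b + 1) = pvSegN ps a b ++ [ps.getD b pvPd] := by
  unfold pvSegN
  have e : b + 1 - a = (b - a) + 1 := by omega
  rw [e, List.take_add_one]
  congr 1
  have hlt : b - a < (ps.drop a).length := by simp; omega
  rw [List.getElem?_eq_getElem hlt]
  simp only [List.getElem_drop, Option.toList_some, List.getD_eq_getElem ps pvPd h2]
  congr 2
  omega

lemma pvSeg_single (ps : List ((List (String × Int)) × (List (String × Int)))) (k : Nat)
    (h : k < ps.length) : pvSegN ps k (k + 1) = [ps.getD k pvPd] := by
  unfold pvSegN
  rw [show k + 1 - k = 1 by omega, List.drop_eq_getElem_cons h]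
  simp only [List.take_succ_cons, List.take_zero, List.getD_eq_getElem ps pvPd h]

lemma pvRealB_eq (d : List (String × Int)) : pvRealB d = pvReal d := rfl

lemma pvImagB_eq (d : List (String × Int)) : pvImagB d = pvImag d := rfl

lemma pvReal_add2 (x y : List (String × Int)) : pvReal (pvAdd2 x y) = pvReal x + pvReal y := rfl

lemma pvImag_add2 (x y : List (String × Int)) : pvImag (pvAdd2 x y) = pvImag x + pvImag y := rfl

lemma pvCompare2_add2 (a b x y : List (String × Int)) :
    pvCompare2 (pvAdd2 b a) (pvAdd2 x y) = (pvPairSum (a, b) == pvPairSum (x, y)) := by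
  simp only [pvCompare2, pvReal_add2, pvImag_add2, pvPairSum, pvRealB_eq, pvImagB_eq]
  rw [Bool.eq_iff_iff]
  simp [Prod.ext_iff]
  constructor
  · rintro ⟨h1, h2⟩; exact ⟨by omega, by omega⟩
  · rintro ⟨h1, h2⟩; exact ⟨by omega, by omega⟩

lemma pvFlat_last (ps : List ((List (String × Int)) × (List (String × Int)))) (a b : Nat)
    (h1 : a < b) (h2 : b ≤ ps.length) (d : List (String × Int)) :
    PySem.List.pyGetD (pvFlat (pvSegN ps a b)) (-1) d = (ps.getD (b - 1) pvPd).2 ∧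
    PySem.List.pyGetD (pvFlat (pvSegN ps a b)) (-2) d = (ps.getD (b - 1) pvPd).1 := by
  have e : b = (b - 1) + 1 := by omega
  rw [e, pvSeg_snoc ps a (b - 1) (by omega) (by omega), pvFlat_append, pvFlat_single]
  constructor
  · exact pvGet_neg1 _ _ _ _
  · exact pvGet_neg2 _ _ _ _

lemma pvSums_getD (ps : List ((List (String × Int)) × (List (String × Int)))) (k : Nat)
    (h : k < ps.length) :
    PySem.List.pyGetD (ps.map pvPairSum) (k : Int) (0, 0) = pvPairSum (ps.getD k pvPd) := by
  rw [PySem.List.pyGetD_natCast]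
  rw [List.getD_eq_getElem _ _ (by simpa using h), List.getD_eq_getElem ps pvPd h]
  simp

set_option maxHeartbeats 1000000 in
lemma pvMain (ps : List ((List (String × Int)) × (List (String × Int))))
    (k bs bl start : Nat)
    (hk1 : 1 ≤ k) (hk2 : k ≤ ps.length) (hs : start < k) (hb : bs + bl ≤ k) :
    ∃ bs' bl' st' : Nat,
      (PySem.List.pyRange (k : Int) ((ps.length : Int) + 1) 1).foldl
          (pvStepB (ps.map pvPairSum)) ((bs : Int), (bl : Int), (start : Int)) =
        ((bs' : Int), (bl' : Int), (st' : Int)) ∧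
      bs' + bl' ≤ ps.length ∧
      pvFinal ((ps.drop k).foldl pvStepP
          (pvFlat (pvSegN ps start k), pvFlat (pvSegN ps bs (bs + bl)))) =
        pvFlat (pvSegN ps bs' (bs' + bl')) := by
  rw [PySem.List.pyRange_one_cons (by push_cast; omega), List.foldl_cons]
  rcases eq_or_lt_of_le hk2 with heq | hlt
  · -- k = ps.length : the final flush iteration
    rw [PySem.List.pyRange_one_eq_nil (by push_cast; omega)]
    rw [List.drop_eq_nil_of_le (by omega)]
    simp only [List.foldl_nil]
    have hckn : ((k : Int) == ((ps.map pvPairSum).length : Int)) = true := by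
      simp [heq]
    unfold pvStepB
    simp only [hckn, Bool.true_or, if_true]
    by_cases hgt : (k : Int) - (start : Int) > (bl : Int)
    · refine ⟨start, k - start, k, ?_, by omega, ?_⟩
      · rw [if_pos hgt]
        have : (k : Int) - (start : Int) = ((k - start : Nat) : Int) := by omega
        rw [this]
      · unfold pvFinal
        rw [pvFlat_length, pvFlat_length, pvSeg_length _ _ _ (by omega),
          pvSeg_length _ _ _ (by omega), if_pos (by omega)]
        rw [show start + (k - start) = k by omega]
    · refine ⟨bs, bl, k, ?_, by omega, ?_⟩
      · rw [if_neg hgt]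
      · unfold pvFinal
        rw [pvFlat_length, pvFlat_length, pvSeg_length _ _ _ (by omega),
          pvSeg_length _ _ _ (by omega), if_neg (by omega)]
  · -- k < ps.length
    have hfalse : ((k : Int) == ((ps.map pvPairSum).length : Int)) = false := by
      simp; omega
    have hSk := pvSums_getD ps k hlt
    have hSk1 : PySem.List.pyGetD (ps.map pvPairSum) ((k : Int) - 1) (0, 0) =
        pvPairSum (ps.getD (k - 1) pvPd) := by
      rw [show (k : Int) - 1 = ((k - 1 : Nat) : Int) by omega]
      exact pvSums_getD ps (k - 1) (by omega)
    rw [List.drop_eq_getElem_cons hlt, List.foldl_cons,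
      show ps[k] = ps.getD k pvPd from (List.getD_eq_getElem ps pvPd hlt).symm]
    have hA : pvStepP (pvFlat (pvSegN ps start k), pvFlat (pvSegN ps bs (bs + bl)))
        (ps.getD k pvPd) =
        (if pvPairSum (ps.getD (k - 1) pvPd) == pvPairSum (ps.getD k pvPd) then
          (pvFlat (pvSegN ps start k) ++ [(ps.getD k pvPd).1, (ps.getD k pvPd).2],
            pvFlat (pvSegN ps bs (bs + bl)))
        else
          if (pvFlat (pvSegN ps bs (bs + bl))).length < (pvFlat (pvSegN ps start k)).length then
            ([(ps.getD k pvPd).1, (ps.getD k pvPd).2], pvFlat (pvSegN ps start k))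
          else
            ([(ps.getD k pvPd).1, (ps.getD k pvPd).2], pvFlat (pvSegN ps bs (bs + bl)))) := by
      unfold pvStepP
      simp only []
      rw [(pvFlat_last ps start k hs (le_of_lt hlt) []).1,
        (pvFlat_last ps start k hs (le_of_lt hlt) []).2,
        pvCompare2_add2]
    rw [hA]
    by_cases hc : pvPairSum (ps.getD (k - 1) pvPd) = pvPairSum (ps.getD k pvPd)
    · -- equal sums: A extends the run, B's scan state is unchanged
      have heq2 : (pvPairSum (ps.getD k pvPd) == pvPairSum (ps.getD (k - 1) pvPd)) = true := by
        simp only [beq_iff_eq]; exact hc.symm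
      have hBstep : pvStepB (ps.map pvPairSum) ((bs : Int), (bl : Int), (start : Int)) (k : Int) =
          ((bs : Int), (bl : Int), (start : Int)) := by
        unfold pvStepB
        rw [hSk, hSk1, hfalse, heq2]
        rfl
      rw [hBstep, if_pos (show (pvPairSum (ps.getD (k - 1) pvPd) == pvPairSum (ps.getD k pvPd)) = true by
        simp only [beq_iff_eq]; exact hc)]
      have hcur : pvFlat (pvSegN ps start k) ++ [(ps.getD k pvPd).1, (ps.getD k pvPd).2] =
          pvFlat (pvSegN ps start (k + 1)) := by
        rw [pvSeg_snoc ps start k (by omega) hlt, pvFlat_append, pvFlat_single]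
      rw [hcur, show (k : Int) + 1 = ((k + 1 : Nat) : Int) by push_cast; ring]
      have c1 : 1 ≤ k + 1 := by omega
      have c2 : k + 1 ≤ ps.length := by omega
      have c3 : start < k + 1 := by omega
      have c4 : bs + bl ≤ k + 1 := by omega
      exact pvMain ps (k + 1) bs bl start c1 c2 c3 c4
    · -- different sums: A commits and restarts, B closes the run
      have hne : (pvPairSum (ps.getD k pvPd) == pvPairSum (ps.getD (k - 1) pvPd)) = false := by
        simp only [beq_eq_false_iff_ne, ne_eq]
        exact fun h => hc h.symm
      have hBcond : (((k : Int) == ((ps.map pvPairSum).length : Int)) ||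
          !(PySem.List.pyGetD (ps.map pvPairSum) (k : Int) (0, 0) ==
            PySem.List.pyGetD (ps.map pvPairSum) ((k : Int) - 1) (0, 0))) = true := by
        rw [hSk, hSk1, hfalse, hne]
        rfl
      rw [if_neg (show ¬ (pvPairSum (ps.getD (k - 1) pvPd) == pvPairSum (ps.getD k pvPd)) = true by
        simp only [beq_iff_eq]; exact hc)]
      rw [pvFlat_length, pvFlat_length, pvSeg_length _ _ _ (by omega),
        pvSeg_length _ _ _ (by omega)]
      have hpair : [(ps.getD k pvPd).1, (ps.getD k pvPd).2] = pvFlat (pvSegN ps k (k + 1)) := by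
        rw [pvSeg_single ps k hlt, pvFlat_single]
      by_cases hgt : bl < k - start
      · have hBstep : pvStepB (ps.map pvPairSum) ((bs : Int), (bl : Int), (start : Int)) (k : Int) =
            ((start : Int), ((k - start : Nat) : Int), (k : Int)) := by
          unfold pvStepB
          rw [hBcond]
          simp only [if_true]
          rw [if_pos (by push_cast; omega),
            show (k : Int) - (start : Int) = ((k - start : Nat) : Int) by omega]
        rw [hBstep, if_pos (by omega), hpair,
          show (k : Int) + 1 = ((k + 1 : Nat) : Int) by push_cast; ring]
        have c1 : 1 ≤ k + 1 := by omega
        have c2 : k + 1 ≤ ps.length := by omega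
        have c3 : k < k + 1 := by omega
        have c4 : start + (k - start) ≤ k + 1 := by omega
        have hrec := pvMain ps (k + 1) start (k - start) k c1 c2 c3 c4
        rwa [show start + (k - start) = k by omega] at hrec
      · have hBstep : pvStepB (ps.map pvPairSum) ((bs : Int), (bl : Int), (start : Int)) (k : Int) =
            ((bs : Int), (bl : Int), (k : Int)) := by
          unfold pvStepB
          rw [hBcond]
          simp only [if_true]
          rw [if_neg (by push_cast; omega)]
        rw [hBstep, if_neg (by omega), hpair,
          show (k : Int) + 1 = ((k + 1 : Nat) : Int) by push_cast; ring]
        have c1 : 1 ≤ k + 1 := by omega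
        have c2 : k + 1 ≤ ps.length := by omega
        have c3 : k < k + 1 := by omega
        have c4 : bs + bl ≤ k + 1 := by omega
        exact pvMain ps (k + 1) bs bl k c1 c2 c3 c4
termination_by ps.length - k
decreasing_by all_goals omega

-- ===== VERDICT (by name: the statement is the Claim_ definition above) =====
theorem starting_from_the_second_spec : Claim_equal_starting_from_the_second := by
  intro l hdom hpre
  obtain ⟨hlen, -⟩ := hpre
  unfold Spec_starting_from_the_second
  have h1 : PySem.List.pyGet? l 1 = some (l.getD 1 []) := by
    rw [List.getD_eq_getElem _ _ (by omega)]
    simp [PySem.List.pyGet?, PySem.List.pyIdx?, show (1 : Int) < (l.length : Int) by push_cast; omega,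
      List.getElem?_eq_getElem (show (1 : Int).toNat < l.length by omega)]
  have h2 : PySem.List.pyGet? l 2 = some (l.getD 2 []) := by
    rw [List.getD_eq_getElem _ _ (by omega)]
    simp [PySem.List.pyGet?, PySem.List.pyIdx?, show (2 : Int) < (l.length : Int) by push_cast; omega,
      List.getElem?_eq_getElem (show (2 : Int).toNat < l.length by omega)]
  simp only [starting_from_the_second, starting_from_the_second_alt, h1, h2, List.length_map]
  set pairs := (l.getD 1 [], l.getD 2 []) :: pvBuildPairs l 3 with hpairs
  by_cases hone : pairs.length = 1
  · -- a single pair: A's loop does nothing, B returns the pair directly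
    have hnil : pvBuildPairs l 3 = [] := by
      cases hb : pvBuildPairs l 3 with
      | nil => rfl
      | cons x t => rw [hpairs, hb] at hone; simp at hone
    have hb1 : (pairs.length == 1) = true := by simp [hone]
    rw [hb1, if_pos (show (true : Bool) = true from rfl)]
    have h3 := pvFoldA_eq_foldP l 3 ([l.getD 1 [], l.getD 2 []], [])
    rw [show ((3 : Nat) : Int) = (3 : Int) by norm_num] at h3
    rw [h3, hnil]
    simp [hpairs, PySem.List.pyGetD, PySem.List.pyGet?, PySem.List.pyIdx?]
  have hb1 : (pairs.length == 1) = false := by simp [hone]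
  rw [hb1, if_neg (show ¬ (false = true) by simp)]
  obtain ⟨bs', bl', st', hfold, hle, hfin⟩ :=
    pvMain pairs 1 0 0 0 (by omega) (by simp [hpairs]) (by omega) (by omega)
  norm_num at hfold hfin
  have hAfold : (PySem.List.pyRange 3 (l.length : Int) 2).foldl (pvStepA l)
      ([l.getD 1 [], l.getD 2 []], []) =
      List.foldl pvStepP (pvFlat (pvSegN pairs 0 1), pvFlat (pvSegN pairs 0 0)) pairs.tail := by
    have h3 := pvFoldA_eq_foldP l 3 ([l.getD 1 [], l.getD 2 []], [])
    rw [show ((3 : Nat) : Int) = (3 : Int) by norm_num] at h3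
    rw [h3]
    rfl
  rw [hAfold]
  have hgoalA : (if (List.foldl pvStepP (pvFlat (pvSegN pairs 0 1), pvFlat (pvSegN pairs 0 0))
        pairs.tail).2.length <
        (List.foldl pvStepP (pvFlat (pvSegN pairs 0 1), pvFlat (pvSegN pairs 0 0))
          pairs.tail).1.length then
      (List.foldl pvStepP (pvFlat (pvSegN pairs 0 1), pvFlat (pvSegN pairs 0 0))
        pairs.tail).1
    else
      (List.foldl pvStepP (pvFlat (pvSegN pairs 0 1), pvFlat (pvSegN pairs 0 0))
        pairs.tail).2) =
      pvFinal (List.foldl pvStepP (pvFlat (pvSegN pairs 0 1), pvFlat (pvSegN pairs 0 0))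
        pairs.tail) := rfl
  rw [hgoalA, hfin, hfold]
  dsimp only
  rw [show ((bs' : Int) + (bl' : Int)) = (((bs' + bl' : Nat)) : Int) by push_cast; ring,
    PySem.List.slice_natCast]
  have hfl := PySem.List.foldl_append_eq_flatMap
    (fun p : (List (String × Int)) × (List (String × Int)) => [p.1, p.2])
    ((pairs.drop bs').take (bs' + bl' - bs')) []
  rw [List.nil_append] at hfl
  exact hfl.symm
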